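-- pv_equiv track=rewrite | github.com/janskwr/PPPD | 00009_dziewiatelabyicw/lab1.py | merge_sprytny
-- ===== SOURCE A (Python) =====
-- def merge_sprytny(x, y):
--     x.sort()
--     y.sort()
--     u = []
--     v = []
--     pointer_x = 0
--     pointer_y = 0
--     assert len(x) > 0 and len(y) > 0
--     while pointer_x < len(x) and pointer_y < len(y):
--         if x[pointer_x] < y[pointer_y]:
--             pointer_x += 1
--             continue
--         if y[pointer_y] < x[pointer_x]:
--             pointer_y += 1
--             continue
--         start_x = pointer_x
--         start_y = pointer_y
--         while pointer_x < len(x) and x[start_x] == x[pointer_x]: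
--             pointer_x += 1
--         while pointer_y < len(y) and y[start_y] == y[pointer_y]:
--             pointer_y += 1
--         end_x = pointer_x
--         end_y = pointer_y
--         for index_x in range(start_x, end_x):
--             for index_y in range(start_y, end_y):
--                 u.append(index_x)
--                 v.append(index_y)
--     return [u, v]
-- ===== SOURCE B (Python) =====
-- def merge_sprytny(x, y):
--     x.sort()
--     y.sort()
--     assert len(x) > 0 and len(y) > 0
--     y_index = {}
--     for index_y, val in enumerate(y):
--         y_index.setdefault(val, []).append(index_y)
--     u = []
--     v = []
--     for index_x, val in enumerate(x):
--         for index_y in y_index.get(val, []):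
--             u.append(index_x)
--             v.append(index_y)
--     return [u, v]
-- ===== Notes on version B (the rewrite author's own statement) =====
-- stated objective: idiomatic
-- what changed: Replaces the two-pointer merge with nested block-scanning whiles by a dict mapping each value of sorted y to its index list, followed by one pass over sorted x emitting the pairs; Pre_ excludes empty x or y, on which A's assert raises AssertionError.
import Mathlib
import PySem

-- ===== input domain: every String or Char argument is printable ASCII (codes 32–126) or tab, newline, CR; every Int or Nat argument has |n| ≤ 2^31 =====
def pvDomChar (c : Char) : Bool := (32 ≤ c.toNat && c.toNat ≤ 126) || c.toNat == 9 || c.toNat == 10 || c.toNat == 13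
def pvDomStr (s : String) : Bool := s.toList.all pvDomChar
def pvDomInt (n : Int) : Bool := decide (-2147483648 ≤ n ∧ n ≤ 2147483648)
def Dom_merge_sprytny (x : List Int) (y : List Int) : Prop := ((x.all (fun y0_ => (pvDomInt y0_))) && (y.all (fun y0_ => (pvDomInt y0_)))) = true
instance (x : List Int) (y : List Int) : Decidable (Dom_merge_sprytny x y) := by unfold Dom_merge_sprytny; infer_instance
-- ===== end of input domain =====

-- B replaces A's two-pointer merge (with block-scanning inner whiles) by a dict from each
-- value of sorted y to its index list plus one pass over sorted x (objective: idiomatic).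
-- Python A sorts x and y IN PLACE (B does the same); the equivalence proved is about the return value.

-- ===== PORT A =====

-- inner while: advance p while p < len(l) and l[p] == v  (the scanned block of equal values)
def pvAdvA (l : List Int) (v : Int) (p : Nat) : Nat :=
  if _h : p < l.length ∧ l.getD p 0 = v then pvAdvA l v (p + 1) else p
termination_by l.length - p
decreasing_by omega

-- pvAdvA advances at least one step when its first test holds (for the outer loop's termination)
theorem pvAdvA_gt (l : List Int) (v : Int) (p : Nat) (h1 : p < l.length) (h2 : l.getD p 0 = v) :
    p < pvAdvA l v p := by
  have hle : ∀ q, q ≤ pvAdvA l v q := by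
    intro q
    induction q using pvAdvA.induct l v with
    | case1 q h ih => rw [pvAdvA, dif_pos h]; omega
    | case2 q h => rw [pvAdvA, dif_neg h]
  rw [pvAdvA, dif_pos (⟨h1, h2⟩ : p < l.length ∧ l.getD p 0 = v)]
  have := hle (p + 1); omega

-- the outer while loop of A, with the nested for-loops appending to u and v
def pvLoopA (xs ys : List Int) (px py : Nat) (u v : List Int) : List Int × List Int :=
  if _hx : px < xs.length then
    if _hy : py < ys.length then
      if xs.getD px 0 < ys.getD py 0 then pvLoopA xs ys (px + 1) py u v
      else if ys.getD py 0 < xs.getD px 0 then pvLoopA xs ys px (py + 1) u v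
      else
        -- end_x = pvAdvA xs (xs.getD px 0) px, end_y = pvAdvA ys (ys.getD py 0) py
        pvLoopA xs ys (pvAdvA xs (xs.getD px 0) px) (pvAdvA ys (ys.getD py 0) py)
          (u ++ (List.range' px (pvAdvA xs (xs.getD px 0) px - px)).flatMap
                  (fun (ix : Nat) => (List.range' py (pvAdvA ys (ys.getD py 0) py - py)).map
                    (fun _ => (ix : Int))))
          (v ++ (List.range' px (pvAdvA xs (xs.getD px 0) px - px)).flatMap
                  (fun _ => (List.range' py (pvAdvA ys (ys.getD py 0) py - py)).map
                    (fun (iy : Nat) => (iy : Int))))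
    else (u, v)
  else (u, v)
termination_by (xs.length - px) + (ys.length - py)
decreasing_by
  · omega
  · omega
  · have h1 := pvAdvA_gt xs (xs.getD px 0) px _hx rfl
    have h2 := pvAdvA_gt ys (ys.getD py 0) py _hy rfl
    omega

def merge_sprytny (x : List Int) (y : List Int) : List (List Int) :=
  let xs := PySem.List.sorted x (fun a => a) false
  let ys := PySem.List.sorted y (fun a => a) false
  if 0 < xs.length ∧ 0 < ys.length then
    let r := pvLoopA xs ys 0 0 [] []
    [r.1, r.2]
  else []       -- assert fails: Python raises AssertionError (outside Pre_)

-- ===== PORT B =====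

def merge_sprytny_alt (x : List Int) (y : List Int) : List (List Int) :=
  let xs := PySem.List.sorted x (fun a => a) false
  let ys := PySem.List.sorted y (fun a => a) false
  if 0 < xs.length ∧ 0 < ys.length then
    -- y_index.setdefault(val, []).append(index_y)
    let d : PySem.Dict Int (List Int) :=
      (PySem.List.enumerate ys).foldl (fun d p => d.modify p.2 [] (· ++ [p.1])) PySem.Dict.empty
    let r :=
      (PySem.List.enumerate xs).foldl
        (fun (uv : List Int × List Int) p =>
          (uv.1 ++ (d.getD p.2 []).map (fun _ => p.1), uv.2 ++ d.getD p.2 []))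
        ([], [])
    [r.1, r.2]
  else []       -- assert fails (outside Pre_)

-- ===== PRECONDITION & SPEC =====
-- Pre_ excludes exactly the inputs on which A's 'assert' raises AssertionError: empty x or empty y.
def Pre_merge_sprytny (x : List Int) (y : List Int) : Prop := x ≠ [] ∧ y ≠ []
instance (x : List Int) (y : List Int) : Decidable (Pre_merge_sprytny x y) := by
  unfold Pre_merge_sprytny; infer_instance

def pvWitness_merge_sprytny : List Int × List Int := ([3, 1, 2, 1], [2, 1, 2, 5])

def Spec_merge_sprytny (x : List Int) (y : List Int) (out : List (List Int)) : Prop := out = merge_sprytny_alt x y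
instance (x : List Int) (y : List Int) (out : List (List Int)) : Decidable (Spec_merge_sprytny x y out) := by unfold Spec_merge_sprytny; infer_instance

-- ===== CLAIM (what is proved, stated in full; the proofs are below) =====
def Claim_equal_merge_sprytny : Prop := ∀ (x : List Int) (y : List Int), Dom_merge_sprytny x y → Pre_merge_sprytny x y → Spec_merge_sprytny x y (merge_sprytny x y)

-- ===== LEMMAS AND PROOFS =====

-- sortedness in the form the loop proof uses
def pvMono (l : List Int) : Prop := ∀ i j : Nat, i ≤ j → j < l.length → l.getD i 0 ≤ l.getD j 0

-- indices iy ∈ [py, len ys) with ys[iy] = v : the reference "match list"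
def pvMatch (ys : List Int) (py : Nat) (v : Int) : List Nat :=
  (List.range' py (ys.length - py)).filter (fun iy => ys.getD iy 0 = v)

-- the pairs still to be emitted from pointers (px, py), one output column selected by f
def pvRest (xs ys : List Int) (px py : Nat) (f : Nat → Nat → Int) : List Int :=
  (List.range' px (xs.length - px)).flatMap
    (fun ix => (pvMatch ys py (xs.getD ix 0)).map (fun iy => f ix iy))

-- ---- pvAdvA characterisation ----
theorem pvAdvA_le_len (l : List Int) (v : Int) (p : Nat) (hp : p ≤ l.length) :
    pvAdvA l v p ≤ l.length := by
  induction p using pvAdvA.induct l v with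
  | case1 p h ih => rw [pvAdvA, dif_pos h]; exact ih (by omega)
  | case2 p h => rw [pvAdvA, dif_neg h]; exact hp

theorem pvAdvA_val (l : List Int) (v : Int) (p : Nat) :
    ∀ i, p ≤ i → i < pvAdvA l v p → l.getD i 0 = v := by
  induction p using pvAdvA.induct l v with
  | case1 p h ih =>
    intro i h1 h2
    rw [pvAdvA, dif_pos h] at h2
    rcases Nat.eq_or_lt_of_le h1 with rfl | hlt
    · exact h.2
    · exact ih i hlt h2
  | case2 p h =>
    intro i h1 h2
    rw [pvAdvA, dif_neg h] at h2; omega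

theorem pvAdvA_stop (l : List Int) (v : Int) (p : Nat) :
    ¬(pvAdvA l v p < l.length ∧ l.getD (pvAdvA l v p) 0 = v) := by
  induction p using pvAdvA.induct l v with
  | case1 p h ih => rw [pvAdvA, dif_pos h]; exact ih
  | case2 p h => rw [pvAdvA, dif_neg h]; exact h

-- ---- pvMatch lemmas ----
theorem pvMatch_eq_nil (ys : List Int) (py : Nat) (v : Int)
    (h : ∀ iy, py ≤ iy → iy < ys.length → ys.getD iy 0 ≠ v) : pvMatch ys py v = [] := by
  rw [pvMatch, List.filter_eq_nil_iff]
  intro a ha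
  rw [List.mem_range'_1] at ha
  simp only [decide_eq_true_eq]
  exact h a ha.1 (by omega)

theorem pvMatch_split (ys : List Int) (py ey : Nat) (v : Int)
    (h1 : py ≤ ey) (h2 : ey ≤ ys.length)
    (hne : ∀ iy, py ≤ iy → iy < ey → ys.getD iy 0 ≠ v) :
    pvMatch ys py v = pvMatch ys ey v := by
  have hsplit : List.range' py (ys.length - py) =
      List.range' py (ey - py) ++ List.range' ey (ys.length - ey) := by
    have := @List.range'_append_1 py (ey - py) (ys.length - ey)
    rw [show py + (ey - py) = ey by omega] at this
    rw [show ey - py + (ys.length - ey) = ys.length - py by omega] at this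
    exact this.symm
  rw [pvMatch, hsplit, List.filter_append]
  have : (List.range' py (ey - py)).filter (fun iy => ys.getD iy 0 = v) = [] := by
    rw [List.filter_eq_nil_iff]
    intro a ha
    rw [List.mem_range'_1] at ha
    simp only [decide_eq_true_eq]
    exact hne a ha.1 (by omega)
  rw [this, List.nil_append, pvMatch]

theorem pvMatch_block (ys : List Int) (py ey : Nat) (v : Int)
    (h1 : py ≤ ey) (h2 : ey ≤ ys.length)
    (heq : ∀ iy, py ≤ iy → iy < ey → ys.getD iy 0 = v)
    (hgt : ∀ iy, ey ≤ iy → iy < ys.length → ys.getD iy 0 ≠ v) :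
    pvMatch ys py v = List.range' py (ey - py) := by
  have hsplit : List.range' py (ys.length - py) =
      List.range' py (ey - py) ++ List.range' ey (ys.length - ey) := by
    have := @List.range'_append_1 py (ey - py) (ys.length - ey)
    rw [show py + (ey - py) = ey by omega] at this
    rw [show ey - py + (ys.length - ey) = ys.length - py by omega] at this
    exact this.symm
  rw [pvMatch, hsplit, List.filter_append]
  have hA : (List.range' py (ey - py)).filter (fun iy => ys.getD iy 0 = v) =
      List.range' py (ey - py) := by
    rw [List.filter_eq_self]
    intro a ha
    rw [List.mem_range'_1] at ha
    simp only [decide_eq_true_eq]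
    exact heq a ha.1 (by omega)
  have hB : (List.range' ey (ys.length - ey)).filter (fun iy => ys.getD iy 0 = v) = [] := by
    rw [List.filter_eq_nil_iff]
    intro a ha
    rw [List.mem_range'_1] at ha
    simp only [decide_eq_true_eq]
    exact hgt a ha.1 (by omega)
  rw [hA, hB, List.append_nil]

-- ---- pvRest lemmas ----
theorem pvRest_nil_x (xs ys : List Int) (px py : Nat) (f : Nat → Nat → Int)
    (h : xs.length ≤ px) : pvRest xs ys px py f = [] := by
  simp [pvRest, Nat.sub_eq_zero_of_le h]

theorem pvRest_nil_y (xs ys : List Int) (px py : Nat) (f : Nat → Nat → Int)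
    (h : ys.length ≤ py) : pvRest xs ys px py f = [] := by
  simp [pvRest, pvMatch, Nat.sub_eq_zero_of_le h]

theorem pvRest_cons_x (xs ys : List Int) (px py : Nat) (f : Nat → Nat → Int)
    (h : px < xs.length) :
    pvRest xs ys px py f =
      (pvMatch ys py (xs.getD px 0)).map (fun iy => f px iy) ++ pvRest xs ys (px + 1) py f := by
  rw [pvRest, show xs.length - px = (xs.length - (px + 1)) + 1 by omega, List.range'_succ,
    List.flatMap_cons, pvRest]

theorem pvRest_congr_y (xs ys : List Int) (px py py' : Nat) (f : Nat → Nat → Int)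
    (h : ∀ ix, px ≤ ix → ix < xs.length →
      pvMatch ys py (xs.getD ix 0) = pvMatch ys py' (xs.getD ix 0)) :
    pvRest xs ys px py f = pvRest xs ys px py' f := by
  rw [pvRest, pvRest]
  apply List.flatMap_congr
  intro ix hix
  rw [List.mem_range'_1] at hix
  rw [h ix hix.1 (by omega)]

theorem pvRest_split_x (xs ys : List Int) (px ex py : Nat) (f : Nat → Nat → Int)
    (h1 : px ≤ ex) (h2 : ex ≤ xs.length) :
    pvRest xs ys px py f =
      (List.range' px (ex - px)).flatMap
        (fun ix => (pvMatch ys py (xs.getD ix 0)).map (fun iy => f ix iy)) ++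
      pvRest xs ys ex py f := by
  have hsplit : List.range' px (xs.length - px) =
      List.range' px (ex - px) ++ List.range' ex (xs.length - ex) := by
    have := @List.range'_append_1 px (ex - px) (xs.length - ex)
    rw [show px + (ex - px) = ex by omega] at this
    rw [show ex - px + (xs.length - ex) = xs.length - px by omega] at this
    exact this.symm
  rw [pvRest, hsplit, List.flatMap_append, pvRest]

-- ---- the main loop invariant: A's loop emits exactly pvRest, column-wise ----
theorem pvLoopA_eq (xs ys : List Int) (hx : pvMono xs) (hy : pvMono ys)
    (px py : Nat) (u v : List Int) :
    pvLoopA xs ys px py u v =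
      (u ++ pvRest xs ys px py (fun ix _ => (ix : Int)),
       v ++ pvRest xs ys px py (fun _ iy => (iy : Int))) := by
  by_cases hpx : px < xs.length
  · by_cases hpy : py < ys.length
    · by_cases hlt : xs.getD px 0 < ys.getD py 0
      · -- A skips index px of x: no y from py on matches it
        rw [pvLoopA, dif_pos hpx, dif_pos hpy, if_pos hlt]
        rw [pvLoopA_eq xs ys hx hy (px + 1) py u v]
        have hm : pvMatch ys py (xs.getD px 0) = [] := by
          apply pvMatch_eq_nil
          intro iy h1 h2
          have h3 := hy py iy h1 h2
          omega
        have key : ∀ f, pvRest xs ys px py f = pvRest xs ys (px + 1) py f := by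
          intro f
          rw [pvRest_cons_x xs ys px py f hpx, hm]
          simp
        rw [key, key]
      · by_cases hgt : ys.getD py 0 < xs.getD px 0
        · -- A skips index py of y: no x from px on matches it
          rw [pvLoopA, dif_pos hpx, dif_pos hpy, if_neg hlt, if_pos hgt]
          rw [pvLoopA_eq xs ys hx hy px (py + 1) u v]
          have key : ∀ f, pvRest xs ys px py f = pvRest xs ys px (py + 1) f := by
            intro f
            apply pvRest_congr_y
            intro ix h1 h2
            apply pvMatch_split ys py (py + 1) _ (by omega) (by omega)
            intro iy h3 h4
            have h5 : iy = py := by omega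
            have h6 := hx px ix h1 h2
            subst h5
            omega
          rw [key, key]
        · -- equal block
          have hv : ys.getD py 0 = xs.getD px 0 := by omega
          have hexgt0 : px < pvAdvA xs (xs.getD px 0) px := pvAdvA_gt xs _ px hpx rfl
          have heygt0 : py < pvAdvA ys (ys.getD py 0) py := pvAdvA_gt ys _ py hpy rfl
          have hexle : pvAdvA xs (xs.getD px 0) px ≤ xs.length :=
            pvAdvA_le_len xs _ px (by omega)
          have heyle : pvAdvA ys (ys.getD py 0) py ≤ ys.length :=
            pvAdvA_le_len ys _ py (by omega)
          have hexval : ∀ i, px ≤ i → i < pvAdvA xs (xs.getD px 0) px →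
              xs.getD i 0 = xs.getD px 0 := pvAdvA_val xs _ px
          have heyval : ∀ i, py ≤ i → i < pvAdvA ys (ys.getD py 0) py →
              ys.getD i 0 = xs.getD px 0 := by
            intro i h1 h2
            rw [pvAdvA_val ys _ py i h1 h2, hv]
          have hexgt : ∀ i, pvAdvA xs (xs.getD px 0) px ≤ i → i < xs.length →
              xs.getD px 0 < xs.getD i 0 := by
            intro i h1 h2
            have h3 : pvAdvA xs (xs.getD px 0) px < xs.length := by omega
            have h4 := hx px (pvAdvA xs (xs.getD px 0) px) (by omega) h3
            have h5 := hx (pvAdvA xs (xs.getD px 0) px) i h1 h2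
            have h6 : xs.getD (pvAdvA xs (xs.getD px 0) px) 0 ≠ xs.getD px 0 :=
              fun hc => pvAdvA_stop xs (xs.getD px 0) px ⟨h3, hc⟩
            omega
          have heygt : ∀ i, pvAdvA ys (ys.getD py 0) py ≤ i → i < ys.length →
              xs.getD px 0 < ys.getD i 0 := by
            intro i h1 h2
            have h3 : pvAdvA ys (ys.getD py 0) py < ys.length := by omega
            have h4 := hy py (pvAdvA ys (ys.getD py 0) py) (by omega) h3
            have h5 := hy (pvAdvA ys (ys.getD py 0) py) i h1 h2
            have h6 : ys.getD (pvAdvA ys (ys.getD py 0) py) 0 ≠ ys.getD py 0 :=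
              fun hc => pvAdvA_stop ys (ys.getD py 0) py ⟨h3, hc⟩
            omega
          have hmb : pvMatch ys py (xs.getD px 0) =
              List.range' py (pvAdvA ys (ys.getD py 0) py - py) := by
            apply pvMatch_block ys py _ _ (by omega) heyle heyval
            intro iy h1 h2
            have := heygt iy h1 h2
            omega
          have key : ∀ f, pvRest xs ys px py f =
              (List.range' px (pvAdvA xs (xs.getD px 0) px - px)).flatMap
                (fun ix => (List.range' py (pvAdvA ys (ys.getD py 0) py - py)).map
                  (fun iy => f ix iy)) ++
              pvRest xs ys (pvAdvA xs (xs.getD px 0) px) (pvAdvA ys (ys.getD py 0) py) f := by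
            intro f
            rw [pvRest_split_x xs ys px (pvAdvA xs (xs.getD px 0) px) py f (by omega) hexle]
            congr 1
            · apply List.flatMap_congr
              intro ix hix
              rw [List.mem_range'_1] at hix
              rw [hexval ix hix.1 (by omega), hmb]
            · apply pvRest_congr_y
              intro ix h1 h2
              apply pvMatch_split ys py (pvAdvA ys (ys.getD py 0) py) _ (by omega) heyle
              intro iy h3 h4
              have h5 := heyval iy h3 h4
              have h6 := hexgt ix h1 h2
              omega
          rw [pvLoopA, dif_pos hpx, dif_pos hpy, if_neg hlt, if_neg hgt]
          rw [pvLoopA_eq xs ys hx hy (pvAdvA xs (xs.getD px 0) px)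
            (pvAdvA ys (ys.getD py 0) py) _ _]
          rw [key, key]
          simp only [List.append_assoc]
    · rw [pvLoopA, dif_pos hpx, dif_neg hpy]
      rw [pvRest_nil_y xs ys px py _ (by omega), pvRest_nil_y xs ys px py _ (by omega)]
      simp
  · rw [pvLoopA, dif_neg hpx]
    rw [pvRest_nil_x xs ys px py _ (by omega), pvRest_nil_x xs ys px py _ (by omega)]
    simp
termination_by (xs.length - px) + (ys.length - py)
decreasing_by all_goals omega

-- ---- B side ----
theorem pvFoldlPair {α : Type} (l : List α) (fA gA : α → List Int) (u0 v0 : List Int) :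
    l.foldl (fun (uv : List Int × List Int) p => (uv.1 ++ fA p, uv.2 ++ gA p)) (u0, v0) =
      (u0 ++ l.flatMap fA, v0 ++ l.flatMap gA) := by
  induction l generalizing u0 v0 with
  | nil => simp
  | cons a t ih => simp [ih, List.append_assoc]

theorem pvEnum (l : List Int) (s : Nat) :
    PySem.List.enumerate l (s : Int) =
      (List.range' s l.length).map (fun (i : Nat) => ((i : Int), l.getD (i - s) 0)) := by
  induction l generalizing s with
  | nil => simp [PySem.List.enumerate_nil]
  | cons a t ih =>
    rw [PySem.List.enumerate_cons]
    rw [show ((s : Int) + 1) = ((s + 1 : Nat) : Int) by push_cast; ring, ih (s + 1)]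
    rw [List.length_cons, List.range'_succ, List.map_cons]
    congr 1
    · simp
    · apply List.map_congr_left
      intro i hi
      rw [List.mem_range'_1] at hi
      have : i - s = (i - (s + 1)) + 1 := by omega
      rw [this]
      rfl

theorem pvEnum0 (l : List Int) :
    PySem.List.enumerate l =
      (List.range' 0 l.length).map (fun (i : Nat) => ((i : Int), l.getD i 0)) := by
  have h := pvEnum l 0
  simpa using h

theorem pvDictEq (ys : List Int) (w : Int) :
    ((PySem.List.enumerate ys).foldl
        (fun (d : PySem.Dict Int (List Int)) p => d.modify p.2 [] (· ++ [p.1]))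
        PySem.Dict.empty).getD w [] =
      (pvMatch ys 0 w).map (fun (iy : Nat) => (iy : Int)) := by
  have h1 : (PySem.List.enumerate ys).foldl
        (fun (d : PySem.Dict Int (List Int)) p => d.modify p.2 [] (· ++ [p.1]))
        PySem.Dict.empty =
      ((PySem.List.enumerate ys).map Prod.swap).foldl
        (fun (d : PySem.Dict Int (List Int)) q => d.modify q.1 [] (· ++ [q.2]))
        PySem.Dict.empty := by
    rw [List.foldl_map]; rfl
  rw [h1, PySem.Dict.getD_foldl_modify_append, PySem.Dict.getD_empty, List.nil_append]
  have h0 : PySem.List.enumerate ys = PySem.List.enumerate ys ((0 : Nat) : Int) := by norm_num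
  rw [h0, pvEnum ys 0, List.map_map, List.filter_map, List.map_map]
  rw [pvMatch, Nat.sub_zero]
  have h2 : ((List.range' 0 ys.length).filter
        ((fun (q : Int × Int) => q.1 == w) ∘ Prod.swap ∘ fun (i : Nat) => ((i : Int), ys.getD (i - 0) 0))) =
      ((List.range' 0 ys.length).filter (fun iy => ys.getD iy 0 = w)) := by
    apply List.filter_congr
    intro i _
    simp only [Function.comp]
    rw [Bool.eq_iff_iff]
    simp
  rw [h2]
  apply List.map_congr_left
  intro i _
  rfl

theorem altB_eq (x y : List Int) (hx : x ≠ []) (hy : y ≠ []) :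
    merge_sprytny_alt x y =
      [pvRest (PySem.List.sorted x (fun a => a) false) (PySem.List.sorted y (fun a => a) false)
         0 0 (fun ix _ => (ix : Int)),
       pvRest (PySem.List.sorted x (fun a => a) false) (PySem.List.sorted y (fun a => a) false)
         0 0 (fun _ iy => (iy : Int))] := by
  have hxl : 0 < (PySem.List.sorted x (fun a => a) false).length := by
    rw [PySem.List.length_sorted]; exact List.length_pos_iff.mpr hx
  have hyl : 0 < (PySem.List.sorted y (fun a => a) false).length := by
    rw [PySem.List.length_sorted]; exact List.length_pos_iff.mpr hy
  simp only [merge_sprytny_alt]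
  rw [if_pos (And.intro hxl hyl)]
  rw [pvFoldlPair]
  simp only [List.nil_append]
  simp only [pvDictEq]
  simp only [pvEnum0, List.flatMap_map]
  simp [pvRest, pvMatch, Function.comp_def, List.map_const']

theorem pvMono_sorted (l : List Int) : pvMono (PySem.List.sorted l (fun a => a) false) := by
  intro i j hij hj
  rw [List.getD_eq_getElem _ _ (by omega), List.getD_eq_getElem _ _ hj]
  exact PySem.List.sorted_id_getElem_mono l hij hj

-- ===== VERDICT (by name: the statement is the Claim_ definition above) =====
theorem merge_sprytny_spec : Claim_equal_merge_sprytny := by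
  intro x y _hdom hpre
  obtain ⟨hx, hy⟩ := hpre
  unfold Spec_merge_sprytny
  have hxl : 0 < (PySem.List.sorted x (fun a => a) false).length := by
    rw [PySem.List.length_sorted]; exact List.length_pos_iff.mpr hx
  have hyl : 0 < (PySem.List.sorted y (fun a => a) false).length := by
    rw [PySem.List.length_sorted]; exact List.length_pos_iff.mpr hy
  rw [merge_sprytny, altB_eq x y hx hy]
  simp only [if_pos (And.intro hxl hyl)]
  rw [pvLoopA_eq _ _ (pvMono_sorted x) (pvMono_sorted y) 0 0 [] []]
  simp
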